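-- pv_equiv track=rewrite | github.com/boehmrya/cs1_projects | hw5/hw5b.py | parse
-- ===== SOURCE A (Python) =====
-- def parse(s):
--     listOfWords = [] # maintains the list of words in strings s
--     currentWord = ""
--
--     wordBeingProcessed = False
--
--     i = 0 # serves as an index into the string s
--     while i < len(s):
--         # if the current character is a lower case letter
--         if (s[i] >= "a" and s[i] <= "z"):
--             wordBeingProcessed = True
--             currentWord = currentWord + s[i]
--         # if the current character is an upper case character
--         # do the same as above, except convert character into corresponding
--         # lower case character using the ord() and chr() functions
--         elif (s[i] >= "A" and s[i] <= "Z"):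
--             wordBeingProcessed = True
--             currentWord = currentWord + chr(ord("a") + ord(s[i]) - ord("A"))
--         # else if the current character is a non-letter
--         # immediately following a word
--         elif wordBeingProcessed:
--             if len(currentWord) >= 4:
--                 listOfWords.append(currentWord)
--             wordBeingProcessed = False
--             currentWord = ""
--         i = i + 1
--
--     if wordBeingProcessed and len(currentWord) >= 4:
--         listOfWords.append(currentWord)
--
--     return listOfWords
-- ===== SOURCE B (Python) =====
-- def parse(s):
--     # Mask every non-letter to a space, lowercase the whole string once,
--     # then let str.split() cut out the maximal letter runs; keep the long ones.
--     masked = ''.join(c if ('A' <= c <= 'Z' or 'a' <= c <= 'z') else ' ' for c in s)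
--     return [w for w in masked.lower().split() if len(w) >= 4]
-- ===== Notes on version B (the rewrite author's own statement) =====
-- stated objective: faster
-- what changed: Replaces the per-character state machine (current-word buffer grown by repeated string concatenation, in-word flag, manual ord/chr case conversion, end-of-string flush) with a whole-string pipeline: mask non-letters to spaces, lowercase once, split on whitespace, filter by length.
import Mathlib
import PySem

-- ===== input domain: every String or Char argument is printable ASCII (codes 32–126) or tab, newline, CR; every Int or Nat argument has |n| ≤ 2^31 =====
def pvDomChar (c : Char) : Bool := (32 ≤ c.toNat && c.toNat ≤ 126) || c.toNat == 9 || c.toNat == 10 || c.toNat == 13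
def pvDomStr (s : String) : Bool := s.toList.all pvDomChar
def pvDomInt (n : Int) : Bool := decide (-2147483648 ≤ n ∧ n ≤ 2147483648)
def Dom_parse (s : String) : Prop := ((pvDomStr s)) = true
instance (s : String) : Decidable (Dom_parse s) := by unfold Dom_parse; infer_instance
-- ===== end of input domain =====

-- B replaces A's per-character state machine with a mask/lower/split/filter pipeline (measured faster: avoids repeated string concatenation).

-- ===== PORT A =====
-- A's while loop: index i over s, currentWord buffer, wordBeingProcessed flag,
-- listOfWords accumulator; end-of-string flush in the [] case.
def parseLoopA : List Char → List Char → Bool → List String → List String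
  | [], cur, flag, acc =>
      if flag ∧ cur.length ≥ 4 then acc ++ [String.mk cur] else acc
  | c :: rest, cur, flag, acc =>
      if 'a' ≤ c ∧ c ≤ 'z' then
        parseLoopA rest (cur ++ [c]) true acc
      else if 'A' ≤ c ∧ c ≤ 'Z' then
        -- chr(ord("a") + ord(s[i]) - ord("A"))
        parseLoopA rest (cur ++ [Char.ofNat ('a'.toNat + c.toNat - 'A'.toNat)]) true acc
      else if flag then
        parseLoopA rest [] false (acc ++ if cur.length ≥ 4 then [String.mk cur] else [])
      else
        parseLoopA rest cur flag acc

def parse (s : String) : List String := parseLoopA s.toList [] false []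

-- ===== PORT B =====
-- c if ('A' <= c <= 'Z' or 'a' <= c <= 'z') else ' '
def pvMask (c : Char) : Char :=
  if ('A' ≤ c ∧ c ≤ 'Z') ∨ ('a' ≤ c ∧ c ≤ 'z') then c else ' '

def parse_alt (s : String) : List String :=
  let masked : List Char := s.toList.map pvMask
  ((PySem.Chars.split₀ (PySem.Chars.lower masked)).filter
      (fun w => w.length ≥ 4)).map (fun w => String.mk w)

-- ===== PRECONDITION & SPEC =====
def Spec_parse (s : String) (out : List String) : Prop := out = parse_alt s
instance (s : String) (out : List String) : Decidable (Spec_parse s out) := by unfold Spec_parse; infer_instance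

-- ===== CLAIM (what is proved, stated in full; the proofs are below) =====
def Claim_equal_parse : Prop := ∀ (s : String), Dom_parse s → Spec_parse s (parse s)

-- ===== LEMMAS AND PROOFS =====

lemma go_append (cs cur : List Char) (acc : List (List Char)) :
    PySem.Chars.split₀.go cs cur acc = acc.reverse ++ PySem.Chars.split₀.go cs cur [] := by
  induction cs generalizing cur acc with
  | nil =>
      simp only [PySem.Chars.split₀.go]
      split <;> simp
  | cons c rest ih =>
      simp only [PySem.Chars.split₀.go]
      split
      · split
        · exact ih _ _
        · rw [ih _ (cur.reverse :: acc), ih _ [cur.reverse]]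
          simp
      · exact ih _ _

lemma pvMaskLower_space (c : Char) (h : ¬ (('a' ≤ c ∧ c ≤ 'z') ∨ ('A' ≤ c ∧ c ≤ 'Z'))) :
    PySem.Chars.lowerChar (pvMask c) = ' ' := by
  have h' : ¬ (('A' ≤ c ∧ c ≤ 'Z') ∨ ('a' ≤ c ∧ c ≤ 'z')) := by tauto
  simp [pvMask, h', PySem.Chars.lowerChar, PySem.Chars.isupper]

lemma charLe_toNat {a b : Char} (h : a ≤ b) : a.toNat ≤ b.toNat := Fin.mk_le_mk.mp h

lemma toNat_ofNat_small (m : Nat) (h : m < 128) : (Char.ofNat m).toNat = m := by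
  unfold Char.ofNat
  split
  · rw [← Char.toNat_val]; exact UInt32.toNat_ofNatLT
  · omega

lemma isspace_lower_letter (c : Char) (h : 'a' ≤ c ∧ c ≤ 'z') :
    PySem.Chars.isspace c = false := by
  have h1 : 97 ≤ c.toNat := charLe_toNat h.1
  have h2 : c.toNat ≤ 122 := charLe_toNat h.2
  simp [PySem.Chars.isspace]
  omega

lemma main_lemma (cs cur : List Char) (flag : Bool) (acc : List String)
    (h : flag = true ↔ cur ≠ []) :
    parseLoopA cs cur flag acc =
      acc ++ ((PySem.Chars.split₀.go (cs.map (fun c => PySem.Chars.lowerChar (pvMask c)))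
                cur.reverse []).filter (fun w => w.length ≥ 4)).map (fun w => String.mk w) := by
  induction cs generalizing cur flag acc with
  | nil =>
      simp only [parseLoopA, List.map_nil, PySem.Chars.split₀.go]
      by_cases hf : flag = true
      · have hcur : cur ≠ [] := h.mp hf
        have : cur.reverse.isEmpty = false := by
          simp only [List.isEmpty_eq_false_iff]; simpa using hcur
        rw [this]
        simp only [Bool.false_eq_true, if_false, List.reverse_reverse]
        by_cases h4 : cur.length ≥ 4
        · simp [hf, h4]
        · simp [hf, h4]
      · have hcur : cur = [] := by
          by_contra hc; exact hf (h.mpr hc)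
        subst hcur
        simp [hf]
  | cons c rest ih =>
      simp only [parseLoopA, List.map_cons]
      by_cases hlo : 'a' ≤ c ∧ c ≤ 'z'
      · -- lowercase letter: lowerChar (pvMask c) = c
        have hm : PySem.Chars.lowerChar (pvMask c) = c := by
          have : PySem.Chars.isupper c = false := by
            simp [PySem.Chars.isupper]
            intro _
            exact lt_of_lt_of_le (by decide : 'Z' < 'a') hlo.1
          simp [pvMask, Or.inr hlo, PySem.Chars.lowerChar, this]
        rw [hm]
        have hsp : PySem.Chars.isspace c = false := isspace_lower_letter c hlo
        simp only [PySem.Chars.split₀.go, hsp, Bool.false_eq_true, if_false, if_pos hlo]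
        rw [ih (cur ++ [c]) true acc (by simp)]
        simp
      · by_cases hup : 'A' ≤ c ∧ c ≤ 'Z'
        · -- uppercase letter: lowerChar (pvMask c) = chr(ord 'a' + ord c - ord 'A')
          set d := Char.ofNat ('a'.toNat + c.toNat - 'A'.toNat) with hd
          have key : 'a'.toNat + c.toNat - 'A'.toNat = c.toNat + 32 := by
            have h1 : 'A'.toNat ≤ c.toNat := charLe_toNat hup.1
            have ha : 'a'.toNat = 97 := by decide
            have hA : 'A'.toNat = 65 := by decide
            omega
          have hm : PySem.Chars.lowerChar (pvMask c) = d := by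
            have hiu : PySem.Chars.isupper c = true := by
              simp [PySem.Chars.isupper]; exact hup
            rw [hd, key]
            simp [pvMask, Or.inl hup, PySem.Chars.lowerChar, hiu]
          rw [hm]
          have hsp : PySem.Chars.isspace d = false := by
            apply isspace_lower_letter
            have h1 : 65 ≤ c.toNat := charLe_toNat hup.1
            have h2 : c.toNat ≤ 90 := charLe_toNat hup.2
            have hv : d.toNat = c.toNat + 32 := by
              rw [hd, key]
              exact toNat_ofNat_small _ (by omega)
            constructor
            · show 97 ≤ d.toNat
              omega
            · show d.toNat ≤ 122
              omega
          simp only [PySem.Chars.split₀.go, hsp, Bool.false_eq_true, if_false,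
            if_neg hlo, if_pos hup]
          rw [ih (cur ++ [d]) true acc (by simp)]
          simp
        · -- non-letter: lowerChar (pvMask c) = ' ', a space
          have hm : PySem.Chars.lowerChar (pvMask c) = ' ' :=
            pvMaskLower_space c (by tauto)
          rw [hm]
          have hsp : PySem.Chars.isspace ' ' = true := by decide
          simp only [PySem.Chars.split₀.go, hsp, if_true, if_neg hlo, if_neg hup]
          by_cases hf : flag = true
          · have hcur : cur ≠ [] := h.mp hf
            have hne : cur.reverse.isEmpty = false := by
              simp only [List.isEmpty_eq_false_iff]; simpa using hcur
            rw [hne]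
            simp only [Bool.false_eq_true, if_false, hf, if_true, List.reverse_reverse]
            rw [go_append _ [] [cur]]
            rw [ih [] false _ (by simp)]
            by_cases h4 : cur.length ≥ 4
            · simp [h4]
            · simp [h4]
          · have hfl : flag = false := by
              cases flag
              · rfl
              · exact absurd rfl hf
            subst hfl
            have hcur : cur = [] := by
              by_contra hc; exact hf (h.mpr hc)
            subst hcur
            simp only [List.reverse_nil, List.isEmpty_nil, if_true,
              Bool.false_eq_true, if_false]
            exact ih [] false acc h

-- ===== VERDICT (by name: the statement is the Claim_ definition above) =====
theorem parse_spec : Claim_equal_parse := by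
  intro s _
  show parse s = parse_alt s
  unfold parse parse_alt PySem.Chars.split₀
  rw [main_lemma _ _ _ _ (by simp)]
  simp [PySem.Chars.lower, List.map_map, Function.comp_def]
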